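-- pv_equiv track=rewrite | github.com/dougbertwashere/mppt60 | mppt60.py | intListToString
-- ===== SOURCE A (Python) =====
-- def intListToString(intList):
--     ret_str = ""
--
--     for i in intList:
--         c1 = (i >> 8) & 0xff
--         if c1 == 0:
--             break
--         ret_str += chr(c1)
--
--         c1 = i & 0xFF
--         if c1 == 0:
--             break
--         ret_str += chr(c1)
--
--     return ret_str
-- ===== SOURCE B (Python) =====
-- def intListToString(intList):
--     flat = bytes(b for i in intList for b in ((i >> 8) & 0xff, i & 0xff))
--     return flat.split(b'\x00', 1)[0].decode('latin-1')
-- ===== Notes on version B (the rewrite author's own statement) =====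
-- stated objective: idiomatic
-- what changed: Replaces the per-int loop with interleaved early breaks by a two-phase pass: flatten all ints to a hi,lo byte sequence, cut at the first null byte, and decode it as latin-1 in one step.
import Mathlib
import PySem

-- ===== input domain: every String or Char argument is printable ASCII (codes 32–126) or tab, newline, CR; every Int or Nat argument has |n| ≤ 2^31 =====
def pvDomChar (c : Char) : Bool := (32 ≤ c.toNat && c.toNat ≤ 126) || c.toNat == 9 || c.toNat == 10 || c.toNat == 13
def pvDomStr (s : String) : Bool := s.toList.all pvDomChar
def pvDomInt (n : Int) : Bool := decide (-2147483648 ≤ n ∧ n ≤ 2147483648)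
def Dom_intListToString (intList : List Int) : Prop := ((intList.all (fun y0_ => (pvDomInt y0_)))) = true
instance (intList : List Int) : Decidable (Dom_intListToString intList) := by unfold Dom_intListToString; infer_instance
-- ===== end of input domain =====

-- B replaces A's interleaved early-break loop by flatten-to-bytes, cut at first zero, decode; return values proved equal.
-- ===== PORT A =====
-- A's loop: per int, append chr of high byte then low byte, breaking at the first zero byte.
def iltsGo : List Int → String → String
  | [], acc => acc
  | i :: rest, acc =>
    let c1 := PySem.Int.band (i >>> (8:Nat)) 255
    if c1 = 0 then acc
    else
      let acc1 := acc.push (Char.ofNat c1.toNat)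
      let c2 := PySem.Int.band i 255
      if c2 = 0 then acc1
      else iltsGo rest (acc1.push (Char.ofNat c2.toNat))

def intListToString (intList : List Int) : String := iltsGo intList ""

-- ===== PORT B =====
-- B: flatten to hi,lo bytes, cut at the first zero (split(b'\x00',1)[0]), decode latin-1 (chr per byte).
def intListToString_alt (intList : List Int) : String :=
  let flat : List Int := intList.flatMap (fun (i : Int) => [PySem.Int.band (i >>> (8:Nat)) 255, PySem.Int.band i 255])
  String.ofList ((flat.takeWhile (fun b => b ≠ 0)).map (fun b => Char.ofNat b.toNat))

-- ===== PRECONDITION & SPEC =====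
def Spec_intListToString (intList : List Int) (out : String) : Prop := out = intListToString_alt intList
instance (intList : List Int) (out : String) : Decidable (Spec_intListToString intList out) := by unfold Spec_intListToString; infer_instance

-- ===== CLAIM (what is proved, stated in full; the proofs are below) =====
def Claim_equal_intListToString : Prop := ∀ (intList : List Int), Dom_intListToString intList → Spec_intListToString intList (intListToString intList)

-- ===== LEMMAS AND PROOFS =====
def flatB (l : List Int) : List Int :=
  l.flatMap (fun (i : Int) => [PySem.Int.band (i >>> (8:Nat)) 255, PySem.Int.band i 255])

-- Loop invariant: A's accumulator loop appends exactly the chars of the flattened byte list up to the first zero.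
theorem iltsGo_eq : ∀ (l : List Int) (acc : String),
    (iltsGo l acc).toList = acc.toList ++ (((flatB l).takeWhile (fun b => b ≠ 0)).map (fun b => Char.ofNat b.toNat)) := by
  intro l
  induction l with
  | nil => intro acc; simp [iltsGo, flatB]
  | cons i rest ih =>
    intro acc
    simp only [iltsGo]
    split_ifs with h1 h2
    · simp [flatB, h1]
    · simp [flatB, h1, h2]
    · rw [ih]; simp [flatB, h1, h2]

-- ===== VERDICT (by name: the statement is the Claim_ definition above) =====
theorem intListToString_spec : Claim_equal_intListToString := by
  intro l _
  unfold Spec_intListToString intListToString intListToString_alt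
  apply String.toList_inj.mp
  rw [iltsGo_eq]
  simp [flatB]
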